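-- pv_equiv track=rewrite | github.com/SaudRamai/data_classification_app | data-governance-app/src/services/tagging_service.py | _split_fqn
-- ===== SOURCE A (Python) =====
-- from typing import Dict, List, Optional, Tuple
--
-- def _split_fqn(fq: str) -> Tuple[str, str, str]:
--     s = str(fq or "")
--     if not s:
--         raise ValueError("Empty FQN")
--     parts: List[str] = []
--     buf: List[str] = []
--     in_q = False
--     for ch in s:
--         if in_q:
--             if ch == '"':
--                 in_q = False
--             else:
--                 buf.append(ch)
--         else:
--             if ch == '"':
--                 in_q = True
--             elif ch == '.':
--                 parts.append(''.join(buf).strip('"'))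
--                 buf = []
--             else:
--                 buf.append(ch)
--     if buf:
--         parts.append(''.join(buf).strip('"'))
--     if len(parts) != 3:
--         parts = s.split('.')
--         if len(parts) != 3:
--             raise ValueError(f"Expected DB.SCHEMA.OBJECT, got: {fq}")
--     return parts[0], parts[1], parts[2]
-- ===== SOURCE B (Python) =====
-- from typing import List, Tuple
--
--
-- def _top_split(s: str) -> List[str]:
--     # split s at the dots that lie outside double quotes; raw segments, quotes kept
--     in_q = False
--     for i, ch in enumerate(s):
--         if ch == '"':
--             in_q = not in_q
--         elif ch == '.' and not in_q:
--             return [s[:i]] + _top_split(s[i + 1:])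
--     return [s]
--
--
-- def _split_fqn(fq: str) -> Tuple[str, str, str]:
--     s = str(fq or "")
--     if not s:
--         raise ValueError("Empty FQN")
--     parts = [''.join(c for c in seg if c != '"') for seg in _top_split(s)]
--     if parts[-1] == '':
--         parts.pop()
--     if len(parts) != 3:
--         parts = s.split('.')
--         if len(parts) != 3:
--             raise ValueError(f"Expected DB.SCHEMA.OBJECT, got: {fq}")
--     return parts[0], parts[1], parts[2]
-- ===== Notes on version B (the rewrite author's own statement) =====
-- stated objective: alternative
-- what changed: Replaces A's single stateful scan (parts/buf/in_q accumulator with per-part strip) by a recursive divide: find the first dot outside quotes, slice, recurse; then quote-filter each raw segment and drop a trailing empty part.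
import Mathlib
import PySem

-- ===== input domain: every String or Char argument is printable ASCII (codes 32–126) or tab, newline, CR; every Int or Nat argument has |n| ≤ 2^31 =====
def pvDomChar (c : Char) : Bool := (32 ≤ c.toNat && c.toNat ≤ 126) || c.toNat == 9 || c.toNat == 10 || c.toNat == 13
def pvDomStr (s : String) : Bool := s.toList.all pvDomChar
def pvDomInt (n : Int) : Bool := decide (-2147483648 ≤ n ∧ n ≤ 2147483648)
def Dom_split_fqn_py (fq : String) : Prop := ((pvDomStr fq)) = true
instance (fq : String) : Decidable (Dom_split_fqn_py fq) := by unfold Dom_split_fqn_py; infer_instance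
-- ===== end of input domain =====

-- B replaces A's single stateful scan by a find-first-top-level-dot-and-recurse split; same values (alternative decomposition, not faster).
-- ===== PORT A =====
-- ''.join(buf).strip('"') : strip('"') removes leading and trailing '"' characters (exact hand port)
def stripQ (l : List Char) : List Char :=
  ((l.dropWhile (· == '"')).reverse.dropWhile (· == '"')).reverse

-- the for-loop of _split_fqn: state (parts, buf, in_q), returns (parts, buf) at the end
def aLoop : List Char → List String → List Char → Bool → List String × List Char
  | [], parts, buf, _ => (parts, buf)
  | c :: cs, parts, buf, q =>
    if q then
      if c == '"' then aLoop cs parts buf false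
      else aLoop cs parts (buf ++ [c]) true
    else
      if c == '"' then aLoop cs parts buf true
      else if c == '.' then aLoop cs (parts ++ [String.ofList (stripQ buf)]) [] false
      else aLoop cs parts (buf ++ [c]) false

def split_fqn_py (fq : String) : String × String × String :=
  -- s = str(fq or "") is fq itself for a string argument; 'if not s: raise' is outside Pre_
  let p := aLoop fq.toList [] [] false
  let parts := if p.2 ≠ [] then p.1 ++ [String.ofList (stripQ p.2)] else p.1
  let parts := if parts.length ≠ 3 then (PySem.Chars.splitOn fq.toList ".".toList).map String.ofList else parts
  -- a fallback that is still not 3 parts raises ValueError: outside Pre_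
  (parts.getD 0 "", parts.getD 1 "", parts.getD 2 "")

-- ===== PORT B =====
-- the enumerate loop of _top_split: index of the first '.' outside double quotes
def findTopDot : List Char → Bool → Nat → Option Nat
  | [], _, _ => none
  | c :: cs, q, i =>
    if c == '"' then findTopDot cs (!q) (i + 1)
    else if c == '.' && !q then some i
    else findTopDot cs q (i + 1)

-- needed by topSplit's termination
theorem findTopDot_bounds : ∀ (cs : List Char) (q : Bool) (i j : Nat),
    findTopDot cs q i = some j → i ≤ j ∧ j < i + cs.length := by
  intro cs
  induction cs with
  | nil => intro q i j h; simp [findTopDot] at h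
  | cons c cs ih =>
    intro q i j h
    simp only [findTopDot] at h
    split at h
    · have := ih _ _ _ h; simp [List.length_cons]; omega
    · split at h
      · simp at h; subst h; simp
      · have := ih _ _ _ h; simp [List.length_cons]; omega

-- _top_split: slice at the first top-level dot and recurse
def topSplit (cs : List Char) : List (List Char) :=
  match h : findTopDot cs false 0 with
  | none => [cs]
  | some i => cs.take i :: topSplit (cs.drop (i + 1))
termination_by cs.length
decreasing_by
  have := findTopDot_bounds cs false 0 i h
  simp only [List.length_drop]; omega

def split_fqn_py_alt (fq : String) : String × String × String :=
  -- 'if not s: raise' is outside Pre_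
  let parts := (topSplit fq.toList).map (fun seg => String.ofList (seg.filter (· ≠ '"')))
  let parts := if parts.getLast? == some "" then parts.dropLast else parts
  let parts := if parts.length ≠ 3 then (PySem.Chars.splitOn fq.toList ".".toList).map String.ofList else parts
  (parts.getD 0 "", parts.getD 1 "", parts.getD 2 "")

-- ===== PRECONDITION & SPEC =====
-- indices of the dots of cs lying outside double quotes (an even number of '"' precedes them)
def topDotIdxs (cs : List Char) : List Nat :=
  (List.range cs.length).filter
    (fun i => cs.getD i ' ' == '.' && (cs.take i).count '"' % 2 == 0)

-- Pre_ = exactly where Python A returns: fq nonempty, and either the quote-aware parse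
-- yields 3 parts (top-level dots, plus one if a non-quote char follows the last of them)
-- or the plain fq.split('.') has 3 pieces; everywhere else A raises ValueError.
def Pre_split_fqn_py (fq : String) : Prop :=
  fq ≠ "" ∧
  ((topDotIdxs fq.toList).length
      + (if (fq.toList.drop (((topDotIdxs fq.toList).getLast?.map (· + 1)).getD 0)).any
             (· ≠ '"') then 1 else 0) = 3
    ∨ fq.toList.count '.' = 2)

instance (fq : String) : Decidable (Pre_split_fqn_py fq) := by
  unfold Pre_split_fqn_py; infer_instance

def pvWitness_split_fqn_py : String := "DB.SCH.\"My.Tbl\""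

def Spec_split_fqn_py (fq : String) (out : String × String × String) : Prop := out = split_fqn_py_alt fq
instance (fq : String) (out : String × String × String) : Decidable (Spec_split_fqn_py fq out) := by unfold Spec_split_fqn_py; infer_instance

-- ===== CLAIM (what is proved, stated in full; the proofs are below) =====
def Claim_equal_split_fqn_py : Prop := ∀ (fq : String), Dom_split_fqn_py fq → Pre_split_fqn_py fq → Spec_split_fqn_py fq (split_fqn_py fq)

-- ===== LEMMAS AND PROOFS =====

-- abstract top-level segmentation, quotes removed: the common backbone of both ports
def prep (b : List Char) : List (List Char) → List (List Char)
  | [] => [b]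
  | s :: rest => (b ++ s) :: rest

def gSeg : List Char → Bool → List (List Char)
  | [], _ => [[]]
  | c :: cs, q =>
    if c = '"' then gSeg cs (!q)
    else if c = '.' ∧ q = false then [] :: gSeg cs false
    else prep [c] (gSeg cs q)

-- segments to parts: every completed segment is kept, a final empty one is dropped
def closeSegs : List (List Char) → List String
  | [] => []
  | [s] => if s = [] then [] else [String.ofList s]
  | s :: rest => String.ofList s :: closeSegs rest

theorem gSeg_ne_nil : ∀ (cs : List Char) (q : Bool), gSeg cs q ≠ [] := by
  intro cs
  induction cs with
  | nil => intro q; simp [gSeg]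
  | cons c cs ih =>
    intro q
    simp only [gSeg]
    split
    · exact ih _
    · split
      · simp
      · cases h : gSeg cs q with
        | nil => exact absurd h (ih q)
        | cons s rest => simp [prep]

theorem closeSegs_cons (s : List Char) (L : List (List Char)) (hL : L ≠ []) :
    closeSegs (s :: L) = String.ofList s :: closeSegs L := by
  cases L with
  | nil => exact absurd rfl hL
  | cons t rest => rfl

theorem stripQ_id (l : List Char) (h : ∀ c ∈ l, c ≠ '"') : stripQ l = l := by
  unfold stripQ
  have h1 : l.dropWhile (· == '"') = l := by
    cases l with
    | nil => rfl
    | cons c cs =>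
      rw [List.dropWhile_cons_of_neg]
      simp [h c (by simp)]
  rw [h1]
  have h2 : l.reverse.dropWhile (· == '"') = l.reverse := by
    cases hr : l.reverse with
    | nil => rfl
    | cons c cs =>
      rw [List.dropWhile_cons_of_neg]
      have : c ∈ l := by
        rw [← List.mem_reverse, hr]; simp
      simp [h c this]
  rw [h2, List.reverse_reverse]

def aFinish (p : List String × List Char) : List String :=
  if p.2 ≠ [] then p.1 ++ [String.ofList (stripQ p.2)] else p.1

theorem prep_prep (c : Char) (b : List Char) (L : List (List Char)) (hL : L ≠ []) :
    prep b (prep [c] L) = prep (b ++ [c]) L := by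
  cases L with
  | nil => exact absurd rfl hL
  | cons s rest => simp [prep]

theorem aLoop_close : ∀ (cs : List Char) (parts : List String) (buf : List Char) (q : Bool),
    (∀ c ∈ buf, c ≠ '"') →
    aFinish (aLoop cs parts buf q) = parts ++ closeSegs (prep buf (gSeg cs q)) := by
  intro cs
  induction cs with
  | nil =>
    intro parts buf q hbuf
    simp only [aLoop, gSeg, prep, aFinish, closeSegs]
    rw [stripQ_id buf hbuf]
    by_cases h : buf = []
    · simp [h]
    · simp [h]
  | cons c cs ih =>
    intro parts buf q hbuf
    by_cases hq : c = '"'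
    · subst hq
      cases q <;>
        simp only [aLoop, gSeg, Bool.not_true, Bool.not_false,
          reduceIte, beq_self_eq_true] <;>
        exact ih parts buf _ hbuf
    · have hcq : (c == '"') = false := by simp [hq]
      by_cases hd : c = '.' ∧ q = false
      · obtain ⟨hc, hqf⟩ := hd
        subst hc; subst hqf
        simp only [aLoop, hcq, Bool.false_eq_true, reduceIte, beq_self_eq_true, if_pos]
        rw [ih (parts ++ [String.ofList (stripQ buf)]) [] false (by simp)]
        rw [stripQ_id buf hbuf]
        have hg := gSeg_ne_nil cs false
        have hprep : prep ([] : List Char) (gSeg cs false) = gSeg cs false := by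
          cases h : gSeg cs false with
          | nil => exact absurd h hg
          | cons s rest => simp [prep]
        rw [hprep]
        have : gSeg ('.' :: cs) false = [] :: gSeg cs false := by
          simp [gSeg]
        rw [this]
        have : prep buf ([] :: gSeg cs false) = buf :: gSeg cs false := by
          simp [prep]
        rw [this, closeSegs_cons buf _ hg]
        simp
      · -- append branch: inside quotes any c, or outside quotes c ≠ '"' and c ≠ '.'
        have hbuf' : ∀ x ∈ buf ++ [c], x ≠ '"' := by
          intro x hx
          rcases List.mem_append.mp hx with h | h
          · exact hbuf x h
          · simp at h; subst h; exact hq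
        have hstep : aLoop (c :: cs) parts buf q = aLoop cs parts (buf ++ [c]) q := by
          cases q with
          | true => simp [aLoop, hcq]
          | false =>
            have hc : c ≠ '.' := by
              intro h; exact hd ⟨h, rfl⟩
            simp [aLoop, hcq, hc]
        rw [hstep, ih parts (buf ++ [c]) q hbuf']
        have hgs : gSeg (c :: cs) q = prep [c] (gSeg cs q) := by
          simp only [gSeg, hq, reduceIte]
          rw [if_neg hd]
        rw [hgs, prep_prep c buf _ (gSeg_ne_nil cs q)]

theorem findTopDot_shift : ∀ (cs : List Char) (q : Bool) (n : Nat),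
    findTopDot cs q n = (findTopDot cs q 0).map (n + ·) := by
  intro cs
  induction cs with
  | nil => intro q n; simp [findTopDot]
  | cons c cs ih =>
    intro q n
    simp only [findTopDot]
    split
    · rw [ih (!q) (n + 1), ih (!q) 1, Option.map_map]
      cases findTopDot cs (!q) 0 <;> simp
    · split
      · simp
      · rw [ih q (n + 1), ih q 1, Option.map_map]
        cases findTopDot cs q 0 <;> simp

theorem gSeg_split : ∀ (cs : List Char) (q : Bool),
    (findTopDot cs q 0 = none → gSeg cs q = [cs.filter (· ≠ '"')]) ∧
    (∀ i, findTopDot cs q 0 = some i →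
      gSeg cs q = (cs.take i).filter (· ≠ '"') :: gSeg (cs.drop (i + 1)) false) := by
  intro cs
  induction cs with
  | nil =>
    intro q
    constructor
    · intro _; simp [gSeg]
    · intro i h; simp [findTopDot] at h
  | cons c cs ih =>
    intro q
    by_cases hq : c = '"'
    · subst hq
      have hft : findTopDot ('"' :: cs) q 0 = (findTopDot cs (!q) 0).map (1 + ·) := by
        simp only [findTopDot, beq_self_eq_true, reduceIte]
        exact findTopDot_shift cs (!q) 1
      constructor
      · intro h
        rw [hft] at h
        cases hb : findTopDot cs (!q) 0 with
        | some j => rw [hb] at h; simp at h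
        | none =>
          have := (ih (!q)).1 hb
          simp [gSeg, this]
      · intro i h
        rw [hft] at h
        cases hb : findTopDot cs (!q) 0 with
        | none => rw [hb] at h; simp at h
        | some j =>
          rw [hb] at h; simp at h
          subst h
          have := (ih (!q)).2 j hb
          simp only [gSeg, reduceIte, this]
          congr 1
          · have : 1 + j = j + 1 := by omega
            rw [this, List.take_succ_cons]
            simp
          · have : 1 + j + 1 = (j + 1) + 1 := by omega
            rw [this, List.drop_succ_cons]
    · have hcq : (c == '"') = false := by simp [hq]
      by_cases hd : c = '.' ∧ q = false
      · obtain ⟨hc, hqf⟩ := hd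
        subst hc; subst hqf
        have hft : findTopDot ('.' :: cs) false 0 = some 0 := by
          simp [findTopDot]
        constructor
        · intro h; rw [hft] at h; simp at h
        · intro i h
          rw [hft] at h; simp at h; subst h
          simp [gSeg]
      · have hft : findTopDot (c :: cs) q 0 = (findTopDot cs q 0).map (1 + ·) := by
          have hnd : (c == '.' && !q) = false := by
            cases q with
            | true => simp
            | false =>
              have : c ≠ '.' := fun h => hd ⟨h, rfl⟩
              simp [this]
          simp only [findTopDot, hcq, Bool.false_eq_true, reduceIte, hnd]
          exact findTopDot_shift cs q 1
        have hgs : gSeg (c :: cs) q = prep [c] (gSeg cs q) := by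
          simp only [gSeg, hq, reduceIte]
          rw [if_neg hd]
        constructor
        · intro h
          rw [hft] at h
          cases hb : findTopDot cs q 0 with
          | some j => rw [hb] at h; simp at h
          | none =>
            have := (ih q).1 hb
            rw [hgs, this]
            simp [prep, hq]
        · intro i h
          rw [hft] at h
          cases hb : findTopDot cs q 0 with
          | none => rw [hb] at h; simp at h
          | some j =>
            rw [hb] at h; simp at h; subst h
            have := (ih q).2 j hb
            rw [hgs, this]
            simp only [prep]
            congr 1
            · have h1 : 1 + j = j + 1 := by omega
              rw [h1, List.take_succ_cons]
              simp [hq]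
            · have h2 : 1 + j + 1 = (j + 1) + 1 := by omega
              rw [h2, List.drop_succ_cons]

theorem topSplit_gSeg : ∀ (n : Nat) (cs : List Char), cs.length ≤ n →
    (topSplit cs).map (·.filter (· ≠ '"')) = gSeg cs false := by
  intro n
  induction n with
  | zero =>
    intro cs h
    have : cs = [] := List.eq_nil_of_length_eq_zero (Nat.le_zero.mp h)
    subst this
    rw [topSplit]
    simp [gSeg, findTopDot]
  | succ n ih =>
    intro cs h
    rw [topSplit]
    cases hf : findTopDot cs false 0 with
    | none =>
      simp only [List.map_cons, List.map_nil]
      exact ((gSeg_split cs false).1 hf).symm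
    | some i =>
      have hb := findTopDot_bounds cs false 0 i hf
      have hrec : (topSplit (cs.drop (i + 1))).map (·.filter (· ≠ '"'))
          = gSeg (cs.drop (i + 1)) false := by
        apply ih
        simp only [List.length_drop]
        omega
      simp only [List.map_cons, hrec]
      exact ((gSeg_split cs false).2 i hf).symm

theorem closeSegs_eq (L : List (List Char)) (hL : L ≠ []) :
    closeSegs L = if (L.map String.ofList).getLast? == some "" then (L.map String.ofList).dropLast
                  else L.map String.ofList := by
  induction L with
  | nil => exact absurd rfl hL
  | cons s rest ih =>
    cases rest with
    | nil =>
      simp only [closeSegs, List.map_cons, List.map_nil, List.getLast?_singleton,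
        List.dropLast_singleton]
      by_cases h : s = []
      · subst h
        simp
      · have hne : String.ofList s ≠ "" := by
          simpa [String.ofList_eq_empty_iff] using h
        simp [h, beq_iff_eq, hne]
    | cons t rest' =>
      have hrest : (t :: rest') ≠ ([] : List (List Char)) := by simp
      rw [closeSegs_cons s _ hrest, ih hrest]
      have hlast : ((s :: t :: rest').map String.ofList).getLast?
          = ((t :: rest').map String.ofList).getLast? := by
        simp [List.getLast?_cons_cons]
      by_cases h : ((t :: rest').map String.ofList).getLast? == some ""
      · simp only [List.map_cons] at *
        rw [if_pos h]
        rw [List.getLast?_cons_cons] at *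
        rw [if_pos h]
        rfl
      · simp only [List.map_cons] at *
        rw [if_neg h]
        rw [List.getLast?_cons_cons] at *
        rw [if_neg h]

theorem parts_eq (cs : List Char) :
    aFinish (aLoop cs [] [] false)
      = (let parts := (topSplit cs).map (fun seg => String.ofList (seg.filter (· ≠ '"')));
         if parts.getLast? == some "" then parts.dropLast else parts) := by
  have h1 := aLoop_close cs [] [] false (by simp)
  have hprep : prep ([] : List Char) (gSeg cs false) = gSeg cs false := by
    cases h : gSeg cs false with
    | nil => exact absurd h (gSeg_ne_nil cs false)
    | cons s rest => simp [prep]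
  rw [hprep] at h1
  simp only [List.nil_append] at h1
  rw [h1]
  have h2 : (topSplit cs).map (fun seg => String.ofList (seg.filter (· ≠ '"')))
      = (gSeg cs false).map String.ofList := by
    rw [← topSplit_gSeg cs.length cs (le_refl _)]
    simp [List.map_map, Function.comp]
  simp only [h2]
  exact closeSegs_eq (gSeg cs false) (gSeg_ne_nil cs false)

theorem ports_eq (fq : String) : split_fqn_py fq = split_fqn_py_alt fq := by
  unfold split_fqn_py split_fqn_py_alt
  have h := parts_eq fq.toList
  simp only [aFinish] at h
  simp only [h]

-- ===== VERDICT (by name: the statement is the Claim_ definition above) =====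
theorem split_fqn_py_spec : Claim_equal_split_fqn_py := by
  intro fq _ _
  unfold Spec_split_fqn_py
  exact ports_eq fq
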